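-- pv_equiv track=rewrite | github.com/DanielSongShen/cs224w-project | src/data/pipeline/utils.py | build_step_to_thoughts_mapping
-- ===== SOURCE A (Python) =====
-- from typing import Dict, Any, List, Optional
--
-- def build_step_to_thoughts_mapping(assigned_step: Dict[int, List[int]]) -> Dict[int, List[int]]:
--     """
--     Build reverse mapping from step_id -> list of thought_ids.
--
--     ROBUST: Normalizes string keys from JSON to integers.
--
--     Args:
--         assigned_step: Dictionary mapping thought_id -> [step_ids]
--
--     Returns:
--         Dictionary mapping step_id -> [thought_ids]
--     """
--     step_to_thoughts = {}
--
--     for thought_key, step_ids in assigned_step.items():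
--         # NORMALIZE thought_id to integer (handles JSON string keys)
--         thought_id = int(thought_key) if not isinstance(thought_key, int) else thought_key
--
--         # Ensure step_ids is a list
--         if not isinstance(step_ids, list):
--             step_ids = [step_ids]
--
--         for step_key in step_ids:
--             # NORMALIZE step_id to integer
--             step_id = int(step_key) if not isinstance(step_key, int) else step_key
--
--             if step_id not in step_to_thoughts:
--                 step_to_thoughts[step_id] = []
--             step_to_thoughts[step_id].append(thought_id)  # Now always int
--
--     # Sort thought lists for each step
--     for step_id in step_to_thoughts:
--         step_to_thoughts[step_id].sort()
--
--     return step_to_thoughts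
-- ===== SOURCE B (Python) =====
-- def build_step_to_thoughts_mapping(assigned_step):
--     """Flatten to (step_id, thought_id) pairs, sort the flat list ONCE by
--     thought_id, group by a single setdefault pass (buckets come out sorted,
--     no per-bucket sort), and emit keys in first-occurrence order."""
--     pairs = []
--     for thought_key, step_ids in assigned_step.items():
--         thought_id = int(thought_key)
--         if not isinstance(step_ids, list):
--             step_ids = [step_ids]
--         for step_key in step_ids:
--             pairs.append((int(step_key), thought_id))
--     keys = dict.fromkeys(s for s, _ in pairs)
--     buckets = {}
--     for s, t in sorted(pairs, key=lambda p: p[1]):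
--         buckets.setdefault(s, []).append(t)
--     return {s: buckets[s] for s in keys}
-- ===== Notes on version B (the rewrite author's own statement) =====
-- stated objective: alternative
-- what changed: Instead of A's incremental dict-of-lists followed by a sort of every bucket, B flattens the input into a (step_id, thought_id) pair list, sorts that flat list once by thought_id, groups it in one setdefault pass (so buckets are already sorted), and emits keys in first-occurrence order via an ordered dedup.
import Mathlib
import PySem

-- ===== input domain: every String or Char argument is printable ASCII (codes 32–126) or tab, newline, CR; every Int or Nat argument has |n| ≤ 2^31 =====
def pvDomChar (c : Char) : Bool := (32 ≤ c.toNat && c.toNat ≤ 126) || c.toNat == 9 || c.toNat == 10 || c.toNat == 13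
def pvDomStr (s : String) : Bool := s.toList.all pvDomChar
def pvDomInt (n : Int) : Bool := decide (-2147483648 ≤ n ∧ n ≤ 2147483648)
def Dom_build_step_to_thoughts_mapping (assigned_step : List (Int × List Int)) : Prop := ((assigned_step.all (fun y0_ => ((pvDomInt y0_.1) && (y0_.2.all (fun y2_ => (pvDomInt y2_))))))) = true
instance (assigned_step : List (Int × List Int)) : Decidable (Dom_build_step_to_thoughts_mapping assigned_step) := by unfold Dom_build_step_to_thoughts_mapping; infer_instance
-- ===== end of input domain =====

-- B replaces A's incremental dict-of-lists (append then per-bucket sort) by one flattening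
-- pass into (step_id, thought_id) pairs, a first-occurrence dedup of the step ids, and a
-- sorted filter of the flat pair list per step id (objective: alternative).

-- ===== PORT A =====
-- Transliteration of A. On inputs of this type the int-normalisation and the
-- isinstance-list check are identities, so they vanish. The final in-place
-- 'for step_id in d: d[step_id].sort()' touches each (unique) key once, which is
-- exactly a map of sort over the items list.
def build_step_to_thoughts_mapping (assigned_step : List (Int × List Int)) : List (Int × List Int) :=
  let d : PySem.Dict Int (List Int) :=
    assigned_step.foldl (fun acc p =>
      p.2.foldl (fun acc step_id =>
        let acc := if acc.contains step_id then acc else acc.insert step_id []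
        acc.modify step_id [] (fun l => l ++ [p.1])) acc) PySem.Dict.empty
  d.items.map (fun q => (q.1, PySem.List.sorted q.2 (fun x => x) false))

-- ===== PORT B =====
-- Transliteration of Source B: build the flat pair list, dedup the step ids
-- (dict.fromkeys = PySem.List.dedup), sort the pairs once by thought_id,
-- group with a setdefault-append pass (= Dict.modify), then look each key up.
-- 'buckets[s]' is ported as getD: every s in keys has a pair, so the KeyError
-- branch (the default) is unreachable.
def build_step_to_thoughts_mapping_alt (assigned_step : List (Int × List Int)) : List (Int × List Int) :=
  let pairs : List (Int × Int) :=
    assigned_step.foldl (fun acc p => acc ++ p.2.map (fun s => (s, p.1))) []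
  let keys : List Int := PySem.List.dedup (pairs.map (fun q => q.1))
  let buckets : PySem.Dict Int (List Int) :=
    (PySem.List.sorted pairs (fun p => p.2) false).foldl
      (fun d q => d.modify q.1 [] (fun l => l ++ [q.2])) PySem.Dict.empty
  keys.map (fun s => (s, buckets.getD s []))

-- ===== PRECONDITION & SPEC =====
def Spec_build_step_to_thoughts_mapping (assigned_step : List (Int × List Int)) (out : List (Int × List Int)) : Prop := out = build_step_to_thoughts_mapping_alt assigned_step
instance (assigned_step : List (Int × List Int)) (out : List (Int × List Int)) : Decidable (Spec_build_step_to_thoughts_mapping assigned_step out) := by unfold Spec_build_step_to_thoughts_mapping; infer_instance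

-- ===== CLAIM (what is proved, stated in full; the proofs are below) =====
def Claim_equal_build_step_to_thoughts_mapping : Prop := ∀ (assigned_step : List (Int × List Int)), Dom_build_step_to_thoughts_mapping assigned_step → Spec_build_step_to_thoughts_mapping assigned_step (build_step_to_thoughts_mapping assigned_step)

-- ===== LEMMAS AND PROOFS =====

-- A's body of the inner loop ('insert [] if absent, then append') is one modify step.
theorem pv_step_collapse (acc : PySem.Dict Int (List Int)) (s t : Int) :
    ((if acc.contains s then acc else acc.insert s ([] : List Int)).modify s [] (fun l => l ++ [t]))
      = acc.modify s [] (fun l => l ++ [t]) := by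
  by_cases h : acc.contains s
  · simp [h]
  · have h0 : acc.getD s ([] : List Int) = [] := by
      apply PySem.Dict.getD_of_not_contains
      simpa using h
    simp [h, PySem.Dict.modify, PySem.Dict.getD_insert_self, h0, PySem.Dict.insert_insert_self]

-- An append-accumulating fold is the accumulator followed by a flatMap.
theorem pv_foldl_flat (g : (Int × List Int) → List (Int × Int)) (a : List (Int × Int))
    (l : List (Int × List Int)) :
    l.foldl (fun acc p => acc ++ g p) a = a ++ l.flatMap g := by
  induction l generalizing a with
  | nil => simp
  | cons p rest ih => simp [ih]

-- A's inner loop over one item's step list equals the plain modify-fold.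
theorem pv_inner (t : Int) (ss : List Int) (d : PySem.Dict Int (List Int)) :
    ss.foldl (fun acc step_id =>
        let acc := if acc.contains step_id then acc else acc.insert step_id []
        acc.modify step_id [] (fun l => l ++ [t])) d
      = ss.foldl (fun acc s => acc.modify s [] (fun l => l ++ [t])) d := by
  simp only [pv_step_collapse]

-- A's nested loop equals the single modify-fold over the flattened pair list.
theorem pv_nested_eq_flat (assigned_step : List (Int × List Int)) (d : PySem.Dict Int (List Int)) :
    assigned_step.foldl (fun acc p =>
      p.2.foldl (fun acc step_id =>
        let acc := if acc.contains step_id then acc else acc.insert step_id []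
        acc.modify step_id [] (fun l => l ++ [p.1])) acc) d
    = (assigned_step.flatMap (fun p => p.2.map (fun s => (s, p.1)))).foldl
        (fun acc q => acc.modify q.1 [] (fun l => l ++ [q.2])) d := by
  induction assigned_step generalizing d with
  | nil => rfl
  | cons p rest ih =>
      simp only [List.foldl_cons, List.flatMap_cons, List.foldl_append]
      rw [ih]
      congr 1
      rw [pv_inner]
      simp [List.foldl_map]

-- A bucket of the once-sorted pair list is the sorted bucket of the unsorted one.
theorem pv_bucket (pairs : List (Int × Int)) (k : Int) :
    PySem.List.sorted ((pairs.filter (fun q => q.1 == k)).map (fun q => q.2)) (fun x => x) false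
      = ((PySem.List.sorted pairs (fun p => p.2) false).filter (fun q => q.1 == k)).map (fun q => q.2) := by
  apply PySem.List.sorted_id_eq_of_perm_of_pairwise
  · exact ((PySem.List.sorted_perm pairs (fun p => p.2) false).filter _).map _
  · exact ((PySem.List.sorted_pairwise pairs (fun p => p.2)).sublist
      List.filter_sublist).map _ (fun a b h => h)

theorem build_step_to_thoughts_mapping_spec : Claim_equal_build_step_to_thoughts_mapping := by
  intro assigned_step _
  unfold Spec_build_step_to_thoughts_mapping
  unfold build_step_to_thoughts_mapping build_step_to_thoughts_mapping_alt
  simp only []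
  rw [pv_nested_eq_flat]
  rw [pv_foldl_flat (fun p => p.2.map (fun s => (s, p.1))) [] assigned_step, List.nil_append]
  set P := assigned_step.flatMap (fun p => p.2.map (fun s => (s, p.1))) with hP
  set d := P.foldl (fun acc q => acc.modify q.1 [] (fun l => l ++ [q.2])) PySem.Dict.empty with hd
  have hnd : d.keys.Nodup := by
    rw [hd]
    exact PySem.Dict.nodup_keys_foldl_modify_key P (fun q => q.1) [] (fun d q l => l ++ [q.2])
      PySem.Dict.empty (by simp [PySem.Dict.keys_empty])
  have hkeys : d.keys = PySem.List.dedup (P.map (fun q => q.1)) := by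
    rw [hd, PySem.Dict.keys_foldl_modify_key]
    simp [PySem.Dict.keys_empty, PySem.Set.update_nil_left, PySem.List.dedup_eq_ofList]
  have hget : ∀ k : Int, d.getD k [] = (P.filter (fun q => q.1 == k)).map (fun q => q.2) := by
    intro k
    rw [hd, PySem.Dict.getD_foldl_modify_append]
    simp [PySem.Dict.getD_empty]
  rw [PySem.Dict.items_eq_map_keys d hnd ([] : List Int), hkeys]
  set S := PySem.List.sorted P (fun p => p.2) false with hS
  set b := S.foldl (fun d q => d.modify q.1 [] (fun l => l ++ [q.2])) PySem.Dict.empty with hb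
  have hbget : ∀ k : Int, b.getD k [] = (S.filter (fun q => q.1 == k)).map (fun q => q.2) := by
    intro k
    rw [hb, PySem.Dict.getD_foldl_modify_append]
    simp [PySem.Dict.getD_empty]
  simp only [List.map_map]
  refine List.map_congr_left ?_
  intro k _
  simp only [Function.comp]
  rw [hget k, hbget k, pv_bucket]
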